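-- pv_equiv track=rewrite | github.com/David-Hakobyan1/Different | xndirner/pakagic.py | my_check
-- ===== SOURCE A (Python) =====
-- def my_check(lis1):
--     i = 0
--     for j in range(len(lis1)):
--         if i+1 < len(lis1):
--             if  lis1[i] == "(" and lis1[i+1] == ")" \
--                 or lis1[i] == "{" and lis1[i+1] == "}" \
--                 or lis1[i] == "[" and lis1[i+1] == "]":
--                 lis1.pop(i)
--                 lis1.pop(i)
--                 my_check(lis1)
--             i+=1
--         else:
--             return lis1
-- ===== SOURCE B (Python) =====
-- def my_check(lis1):
--     # Single left-to-right stack pass; cancels each adjacent matching bracket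
--     # pair once. Mutates lis1 in place (as A does) and returns it.
--     pairs = {")": "(", "}": "{", "]": "["}
--     stack = []
--     for c in lis1:
--         if stack and pairs.get(c) == stack[-1]:
--             stack.pop()
--         else:
--             stack.append(c)
--     lis1[:] = stack
--     return lis1
-- ===== Notes on version B (the rewrite author's own statement) =====
-- stated objective: alternative
-- what changed: Replaces A's recursive scheme (scan for an adjacent matching pair, remove it with two list.pop calls, then recursively re-reduce the whole list) with a single left-to-right stack pass that cancels each matching pair once; on the measured random inputs (few cancellable pairs) both behave linearly, so no speed is claimed.
-- outside the precondition, e.g. on my_check([]): A returns None, B returns []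
import Mathlib
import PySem

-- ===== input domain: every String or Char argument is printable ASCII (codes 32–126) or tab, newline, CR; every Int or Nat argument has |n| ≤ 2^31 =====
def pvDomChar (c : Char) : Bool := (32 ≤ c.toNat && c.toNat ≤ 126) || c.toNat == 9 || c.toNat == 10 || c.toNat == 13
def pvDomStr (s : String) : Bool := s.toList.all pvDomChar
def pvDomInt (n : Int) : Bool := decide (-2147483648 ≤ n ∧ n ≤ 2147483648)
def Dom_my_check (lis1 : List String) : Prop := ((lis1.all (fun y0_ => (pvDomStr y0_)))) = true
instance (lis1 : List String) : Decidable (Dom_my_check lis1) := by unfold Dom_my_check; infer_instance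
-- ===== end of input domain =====

-- B replaces A's recursive pop-and-rescan with a single stack pass (alternative algorithm);
-- both A and B mutate the argument list in place in Python (same final contents);
-- the equivalence proved here is about the RETURN value.

-- ===== PORT A =====
-- A's pair test: lis1[i]=="(" and lis1[i+1]==")" or ... (same branch order)
def pairAt (a b : String) : Bool :=
  (a == "(" && b == ")") || (a == "{" && b == "}") || (a == "[" && b == "]")

-- one lis1.pop(i); the port only applies it with i in range (guarded by i+1 < len)
def popAt : List String → Nat → List String
  | [], _ => []
  | _ :: t, 0 => t
  | h :: t, i+1 => h :: popAt t i

-- A's recursion, fueled: Python's call depth is ≤ len/2 + 1 (each recursive call is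
-- on a list 2 shorter), so fuel len+1 is never exhausted on an executed path; the
-- fuel-0 / j-0 fallthrough corresponds to Python's `return None` (only the empty
-- list reaches it; excluded by Pre_).  Indexing uses getD, in bounds under the guard.
mutual
def myCheckF : Nat → List String → List String
  | 0, l => l
  | f+1, l => myCheckLoop f l.length l 0
termination_by f _ => (f, 0)

def myCheckLoop : Nat → Nat → List String → Nat → List String
  | _, 0, l, _ => l
  | f, j+1, l, i =>
    if i + 1 < l.length then
      if pairAt (l.getD i "") (l.getD (i+1) "") then
        myCheckLoop f j (myCheckF f (popAt (popAt l i) i)) (i+1)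
      else
        myCheckLoop f j l (i+1)
    else l
termination_by f j _ _ => (f, j+1)
end

def my_check (lis1 : List String) : List String := myCheckF (lis1.length + 1) lis1

-- ===== PORT B =====
-- Source B: pairs.get(c)
def closerMatch (c : String) : Option String :=
  if c == ")" then some "(" else if c == "}" then some "{" else if c == "]" then some "[" else none

-- one iteration of Source B's loop (stack head = Python stack[-1])
def pushStep (st : List String) (c : String) : List String :=
  match st with
  | [] => [c]
  | t :: rest => if closerMatch c == some t then rest else c :: st

def my_check_alt (lis1 : List String) : List String :=
  (lis1.foldl pushStep []).reverse

-- ===== PRECONDITION & SPEC =====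
-- Pre_ excludes only the empty list, on which A returns None (not a list); B returns [].
def Pre_my_check (lis1 : List String) : Prop := lis1 ≠ []
instance (lis1 : List String) : Decidable (Pre_my_check lis1) := by unfold Pre_my_check; infer_instance
def pvWitness_my_check : List String := ["(", ")"]

def Spec_my_check (lis1 : List String) (out : List String) : Prop := out = my_check_alt lis1
instance (lis1 : List String) (out : List String) : Decidable (Spec_my_check lis1 out) := by unfold Spec_my_check; infer_instance

-- ===== CLAIM (what is proved, stated in full; the proofs are below) =====
def Claim_equal_my_check : Prop := ∀ (lis1 : List String), Dom_my_check lis1 → Pre_my_check lis1 → Spec_my_check lis1 (my_check lis1)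

-- ===== LEMMAS AND PROOFS =====

-- "no adjacent matching pair" in list order
def NoPair (l : List String) : Prop := l.IsChain (fun a b => closerMatch b ≠ some a)
-- the stack invariant (head = most recently pushed)
def StackOK (st : List String) : Prop := st.IsChain (fun x y => closerMatch x ≠ some y)

lemma pairAt_iff (a b : String) : pairAt a b = true ↔ closerMatch b = some a := by
  constructor
  · intro h
    simp only [pairAt, Bool.or_eq_true, Bool.and_eq_true, beq_iff_eq] at h
    rcases h with (⟨ha, hb⟩ | ⟨ha, hb⟩) | ⟨ha, hb⟩ <;> rw [ha, hb] <;> rfl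
  · intro h
    unfold closerMatch at h
    split_ifs at h with h1 h2 h3 <;> simp_all [pairAt]

lemma opener_none {a b : String} (h : closerMatch b = some a) : closerMatch a = none := by
  unfold closerMatch at h
  split_ifs at h with h1 h2 h3 <;> simp_all <;> subst h <;> rfl

lemma pushStep_opener (st : List String) (a : String) (ha : closerMatch a = none) :
    pushStep st a = a :: st := by
  cases st with
  | nil => rfl
  | cons t r => simp [pushStep, ha]

lemma cancel_core {a b : String} (h : closerMatch b = some a) (s : List String) :
    pushStep (pushStep s a) b = s := by
  rw [pushStep_opener s a (opener_none h)]
  simp [pushStep, h]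

lemma popAt_length : ∀ (l : List String) (i : Nat), i < l.length → (popAt l i).length = l.length - 1 := by
  intro l
  induction l with
  | nil => intro i h; simp at h
  | cons hd t ih =>
    intro i h
    cases i with
    | zero => simp [popAt]
    | succ i =>
      simp only [popAt, List.length_cons]
      rw [ih i (by simpa using h)]
      simp at h
      omega

lemma foldl_popAt2 : ∀ (i : Nat) (l st : List String), i + 1 < l.length →
    closerMatch (l.getD (i+1) "") = some (l.getD i "") →
    List.foldl pushStep st (popAt (popAt l i) i) = List.foldl pushStep st l := by
  intro i
  induction i with
  | zero =>
    intro l st hlen hm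
    match l, hlen with
    | a :: b :: t, _ =>
      simp only [List.getD] at hm
      simp only [popAt, List.foldl_cons]
      rw [cancel_core (by simpa using hm)]
  | succ i ih =>
    intro l st hlen hm
    match l, hlen with
    | h :: t, hlen =>
      simp only [popAt, List.foldl_cons]
      exact ih t (pushStep st h) (by simpa using hlen) (by simpa using hm)

lemma stackOK_push {st : List String} (c : String) (h : StackOK st) : StackOK (pushStep st c) := by
  cases st with
  | nil => exact List.IsChain.singleton _
  | cons t r =>
    unfold pushStep
    by_cases hc : closerMatch c == some t
    · simp only [hc, if_pos]
      exact h.tail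
    · simp only [hc, if_neg, Bool.false_eq_true, not_false_iff]
      exact List.isChain_cons_cons.mpr ⟨by simpa using hc, h⟩

lemma stackOK_foldl : ∀ (l st : List String), StackOK st → StackOK (List.foldl pushStep st l) := by
  intro l
  induction l with
  | nil => intro st h; exact h
  | cons c t ih => intro st h; exact ih _ (stackOK_push c h)

lemma noPair_alt (l : List String) : NoPair (my_check_alt l) := by
  unfold my_check_alt NoPair
  exact List.isChain_reverse.mpr (stackOK_foldl l [] .nil)

lemma foldl_of_noPair : ∀ (l st : List String), NoPair l → StackOK st →
    (∀ t c, st.head? = some t → l.head? = some c → closerMatch c ≠ some t) →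
    List.foldl pushStep st l = l.reverse ++ st := by
  intro l
  induction l with
  | nil => intro st _ _ _; simp
  | cons c rest ih =>
    intro st hnp hst hcompat
    have hpush : pushStep st c = c :: st := by
      cases st with
      | nil => rfl
      | cons t r =>
        have : closerMatch c ≠ some t := hcompat t c rfl rfl
        simp [pushStep, this]
    rw [List.foldl_cons, hpush,
      ih (c :: st) hnp.tail
        (by
          apply List.isChain_cons.mpr
          refine ⟨?_, hst⟩
          intro y hy
          cases st with
          | nil => simp at hy
          | cons t r =>
            simp at hy
            subst hy
            exact hcompat _ c rfl rfl)
        (by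
          intro t c' ht hc'
          simp at ht
          subst ht
          exact hnp.rel_head? hc')]
    simp

lemma alt_of_noPair {l : List String} (h : NoPair l) : my_check_alt l = l := by
  unfold my_check_alt
  rw [foldl_of_noPair l [] h .nil (by intro t c ht; simp at ht)]
  simp

lemma alt_idem (l : List String) : my_check_alt (my_check_alt l) = my_check_alt l :=
  alt_of_noPair (noPair_alt l)

lemma pushStep_length (st : List String) (c : String) :
    (pushStep st c).length ≤ st.length + 1 := by
  cases st with
  | nil => simp [pushStep]
  | cons t r =>
    unfold pushStep
    by_cases h : closerMatch c == some t
    · simp [h]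
      omega
    · simp [h]


lemma foldl_length : ∀ (l st : List String),
    (List.foldl pushStep st l).length ≤ st.length + l.length := by
  intro l
  induction l with
  | nil => intro st; simp
  | cons c t ih =>
    intro st
    calc (List.foldl pushStep (pushStep st c) t).length
        ≤ (pushStep st c).length + t.length := ih _
      _ ≤ st.length + 1 + t.length := by have := pushStep_length st c; omega
      _ = st.length + (c :: t).length := by simp; omega

lemma alt_length_le (l : List String) : (my_check_alt l).length ≤ l.length := by
  unfold my_check_alt
  have := foldl_length l []
  simpa using this

lemma alt_popAt2 {i : Nat} {l : List String} (hlen : i + 1 < l.length)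
    (hm : closerMatch (l.getD (i+1) "") = some (l.getD i "")) :
    my_check_alt (popAt (popAt l i) i) = my_check_alt l := by
  unfold my_check_alt
  rw [foldl_popAt2 i l [] hlen hm]

lemma noPair_scan {l : List String} (h : NoPair l) (k : Nat) (hk : k + 1 < l.length) :
    pairAt (l.getD k "") (l.getD (k+1) "") = false := by
  have h1 := (List.isChain_iff_getElem.mp h) k hk
  rw [List.getD_eq_getElem l _ (by omega), List.getD_eq_getElem l _ hk]
  by_contra hc
  have : pairAt l[k] l[k+1] = true := by
    cases hb : pairAt l[k] l[k+1] with
    | false => exact absurd hb hc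
    | true => rfl
  exact h1 ((pairAt_iff _ _).mp this)

lemma loop_eq (f : Nat) (IH : ∀ l : List String, l.length ≤ f → myCheckF f l = my_check_alt l) :
    ∀ (j : Nat) (l : List String) (i : Nat),
      (∀ k, k < i → k + 1 < l.length → pairAt (l.getD k "") (l.getD (k+1) "") = false) →
      l.length ≤ j + i + 1 → l.length ≤ f + 1 →
      myCheckLoop f j l i = my_check_alt l := by
  intro j
  induction j with
  | zero =>
    intro l i hscan hji _
    have hnp : NoPair l := by
      apply List.isChain_iff_getElem.mpr
      intro k hk
      have hkl : k < i := by omega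
      have := hscan k hkl hk
      rw [List.getD_eq_getElem l _ (by omega), List.getD_eq_getElem l _ hk] at this
      intro hc
      rw [(pairAt_iff _ _).mpr hc] at this
      exact Bool.true_eq_false.mp this
    simpa [myCheckLoop] using (alt_of_noPair hnp).symm
  | succ j ihj =>
    intro l i hscan hji hf
    rw [myCheckLoop]
    by_cases hlt : i + 1 < l.length
    · rw [if_pos hlt]
      by_cases hp : pairAt (l.getD i "") (l.getD (i+1) "") = true
      · rw [if_pos hp]
        have hm := (pairAt_iff _ _).mp hp
        have hl1 : (popAt l i).length = l.length - 1 := popAt_length l i (by omega)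
        have hl2 : (popAt (popAt l i) i).length = l.length - 2 := by
          rw [popAt_length _ i (by omega), hl1]
          omega
        have hrec : myCheckF f (popAt (popAt l i) i) = my_check_alt (popAt (popAt l i) i) :=
          IH _ (by omega)
        have halt : my_check_alt (popAt (popAt l i) i) = my_check_alt l := alt_popAt2 hlt hm
        rw [hrec, halt]
        have hnp := noPair_alt l
        have hlen'' : (my_check_alt l).length ≤ l.length - 2 := by
          have h1 := alt_length_le (popAt (popAt l i) i)
          rw [halt] at h1
          omega
        rw [ihj (my_check_alt l) (i+1)
          (fun k _ hk => noPair_scan hnp k hk) (by omega) (by omega)]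
        exact alt_idem l
      · rw [if_neg hp]
        apply ihj l (i+1) _ (by omega) hf
        intro k hk hkl
        by_cases hki : k < i
        · exact hscan k hki hkl
        · have : k = i := by omega
          subst this
          exact Bool.not_eq_true _ |>.mp hp
    · rw [if_neg hlt]
      have hnp : NoPair l := by
        apply List.isChain_iff_getElem.mpr
        intro k hk
        have hkl : k < i := by omega
        have := hscan k hkl hk
        rw [List.getD_eq_getElem l _ (by omega), List.getD_eq_getElem l _ hk] at this
        intro hc
        rw [(pairAt_iff _ _).mpr hc] at this
        exact Bool.true_eq_false.mp this
      exact (alt_of_noPair hnp).symm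

lemma myCheckF_eq : ∀ (f : Nat) (l : List String), l.length ≤ f → myCheckF f l = my_check_alt l := by
  intro f
  induction f with
  | zero =>
    intro l h
    have : l = [] := List.length_eq_zero_iff.mp (by omega)
    subst this
    simp [myCheckF, my_check_alt]
  | succ f ih =>
    intro l h
    rw [myCheckF]
    exact loop_eq f ih l.length l 0 (by intro k hk; omega) (by omega) h

-- ===== VERDICT (by name: the statement is the Claim_ definition above) =====
theorem my_check_spec : Claim_equal_my_check := by
  intro lis1 _ _
  unfold Spec_my_check my_check
  exact myCheckF_eq (lis1.length + 1) lis1 (by omega)
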